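-- pv_equiv track=rewrite | github.com/diegoasanch/Fundamentos-de-Progra-2019 | TP6/TP6.4 Invertir los elementos en posicion impar de una lista.py | invertirlista
-- ===== SOURCE A (Python) =====
-- def invertirlista(lista):
--     largo = len(lista)
--     if largo%2 == 0:         #si la lista tiene una cantidad par de numeros comenzamos desde el penultimo
--         pos = largo - 1      #ya que el numero de orden del ultimo elemento es el largo -1 y por lo tanto ese seria impar
--     else:
--         pos = largo - 2      #y si tiene una cantidad impar comenzamos desde el ante-penultimo
--     hasta = largo//2         #llegamos hasta la mitad de la lista porque si no la invertiriamos de nuevo y quedaria igual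
--     for i in range(1,hasta,2):
--         temporal = lista[i]         #intercambio de valores con el auxiliar temporal
--         lista[i]= lista[pos]
--         lista[pos] = temporal
--         pos=pos-2
--     return lista
-- ===== SOURCE B (Python) =====
-- def invertirlista(lista):
--     # Reverse the odd-position elements via slice assignment (in place, same
--     # mutation of the argument as the original's swap loop).
--     lista[1::2] = lista[1::2][::-1]
--     return lista
-- ===== Notes on version B (the rewrite author's own statement) =====
-- stated objective: simpler
-- what changed: Replaces the outside-in two-pointer swap loop (with manual temp-variable swaps and a decreasing second index) by extracting the odd-position slice, reversing it, and slice-assigning it back in place.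
import Mathlib
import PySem

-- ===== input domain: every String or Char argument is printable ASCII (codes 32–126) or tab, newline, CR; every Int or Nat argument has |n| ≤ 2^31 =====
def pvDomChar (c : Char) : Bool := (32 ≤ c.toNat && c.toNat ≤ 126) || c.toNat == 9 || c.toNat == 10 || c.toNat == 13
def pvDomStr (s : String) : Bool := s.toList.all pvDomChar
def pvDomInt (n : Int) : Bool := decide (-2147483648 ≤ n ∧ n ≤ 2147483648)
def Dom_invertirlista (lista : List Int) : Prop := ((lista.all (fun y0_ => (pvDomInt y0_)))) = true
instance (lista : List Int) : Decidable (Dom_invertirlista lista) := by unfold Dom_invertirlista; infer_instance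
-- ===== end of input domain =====

-- B replaces A's outside-in swap loop by slice-extract / reverse / slice-assign; both Pythons
-- mutate the argument in place identically, and the theorem below is about the returned value.

-- ===== PORT A =====
-- one iteration of A's for-loop body on the state (lista, pos)
def pvSwapStep (st : List Int × Int) (i : Int) : List Int × Int :=
  let temporal := PySem.List.pyGetD st.1 i 0          -- lista[i] (always in range on A's iterations)
  let l1 := PySem.List.pySetD st.1 i (PySem.List.pyGetD st.1 st.2 0)   -- lista[i] = lista[pos]
  let l2 := PySem.List.pySetD l1 st.2 temporal        -- lista[pos] = temporal
  (l2, st.2 - 2)                                      -- pos = pos - 2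

def invertirlista (lista : List Int) : List Int :=
  let largo : Int := lista.length
  let pos : Int := if PySem.Int.mod largo 2 = 0 then largo - 1 else largo - 2
  let hasta : Int := PySem.Int.floordiv largo 2
  ((PySem.List.pyRange 1 hasta 2).foldl pvSwapStep (lista, pos)).1

-- ===== PORT B =====
-- lista[1::2]  (extended slice with step 2, exact: every second element starting at index 1)
def pvOdds : List Int → List Int
  | [] => []
  | [_] => []
  | _ :: b :: r => b :: pvOdds r

-- lista[1::2] = vs  (extended slice assignment with step 2; exact when vs has the slice's length,
-- which is the only way B calls it)
def pvSetOdds : List Int → List Int → List Int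
  | [], _ => []
  | [a], _ => [a]
  | a :: b :: r, [] => a :: b :: r
  | a :: _ :: r, v :: vs => a :: v :: pvSetOdds r vs

def invertirlista_alt (lista : List Int) : List Int :=
  pvSetOdds lista (pvOdds lista).reverse

-- ===== PRECONDITION & SPEC =====
def Spec_invertirlista (lista : List Int) (out : List Int) : Prop := out = invertirlista_alt lista
instance (lista : List Int) (out : List Int) : Decidable (Spec_invertirlista lista out) := by unfold Spec_invertirlista; infer_instance

-- ===== CLAIM (what is proved, stated in full; the proofs are below) =====
def Claim_equal_invertirlista : Prop := ∀ (lista : List Int), Dom_invertirlista lista → Spec_invertirlista lista (invertirlista lista)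

-- ===== LEMMAS AND PROOFS =====

-- the common value both programs produce, position by position (K = len/2 odd positions;
-- odd position j receives the element from odd position 2*K - j)
def pvTarget (l0 : List Int) (j : Nat) : Int :=
  if j % 2 = 1 then l0.getD (2*(l0.length/2) - j) 0 else l0.getD j 0

lemma pvLen_setOdds (l : List Int) (vs : List Int) : (pvSetOdds l vs).length = l.length := by
  induction l, vs using pvSetOdds.induct with
  | case1 vs => simp [pvSetOdds]
  | case2 a vs => simp [pvSetOdds]
  | case3 a b r => simp [pvSetOdds]
  | case4 a b r v vs ih => simpa [pvSetOdds] using ih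

lemma pvLen_odds (l : List Int) : (pvOdds l).length = l.length / 2 := by
  induction l using pvOdds.induct with
  | case1 => simp [pvOdds]
  | case2 a => simp [pvOdds]
  | case3 a b r ih => simp [pvOdds, ih]; omega

lemma pvGetD_odds (l : List Int) : ∀ t, t < l.length / 2 →
    (pvOdds l).getD t 0 = l.getD (2*t+1) 0 := by
  induction l using pvOdds.induct with
  | case1 => intro t ht; simp at ht
  | case2 a => intro t ht; simp at ht
  | case3 a b r ih =>
      intro t ht
      cases t with
      | zero => simp [pvOdds]
      | succ t' =>
          have := ih t' (by simp at ht ⊢; omega)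
          simpa [pvOdds, List.getD_cons_succ, show 2*(t'+1)+1 = (2*t'+1)+1+1 by ring] using this

lemma pvGetD_setOdds (l : List Int) (vs : List Int) (hv : vs.length = l.length / 2) :
    ∀ j, j < l.length →
      (pvSetOdds l vs).getD j 0 = if j % 2 = 1 then vs.getD ((j-1)/2) 0 else l.getD j 0 := by
  induction l, vs using pvSetOdds.induct with
  | case1 vs => intro j hj; simp at hj
  | case2 a vs =>
      intro j hj
      have : j = 0 := by simp at hj; omega
      subst this; simp [pvSetOdds]
  | case3 a b r => exfalso; simp at hv; omega
  | case4 a b r v vs ih =>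
      intro j hj
      have hv' : vs.length = r.length / 2 := by simp at hv; omega
      match j with
      | 0 => simp [pvSetOdds]
      | 1 => simp [pvSetOdds]
      | (j'+2) =>
          have hj' : j' < r.length := by simp at hj; omega
          have hrec := ih hv' j' hj'
          have e1 : (j'+2) % 2 = j' % 2 := by omega
          rw [pvSetOdds]
          simp only [List.getD_cons_succ, hrec, e1]
          by_cases hodd : j' % 2 = 1
          · have e2 : (j' + 2 - 1) / 2 = (j' - 1) / 2 + 1 := by omega
            simp only [hodd, ite_true, e2, List.getD_cons_succ]
          · simp [hodd]

lemma pvGetD_rev (xs : List Int) : ∀ t, t < xs.length →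
    xs.reverse.getD t 0 = xs.getD (xs.length - 1 - t) 0 := by
  intro t ht
  have h1 : t < xs.reverse.length := by simpa using ht
  have h2 : xs.length - 1 - t < xs.length := by omega
  rw [List.getD_eq_getElem?_getD, List.getD_eq_getElem?_getD,
      List.getElem?_eq_getElem h1, List.getElem?_eq_getElem h2, List.getElem_reverse]

lemma pvAlt_getD (l : List Int) : ∀ j, j < l.length →
    (invertirlista_alt l).getD j 0 = pvTarget l j := by
  intro j hj
  have hK := pvLen_odds l
  have hrev : (pvOdds l).reverse.length = l.length / 2 := by simpa using hK
  rw [invertirlista_alt, pvGetD_setOdds l _ hrev j hj, pvTarget]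
  by_cases hodd : j % 2 = 1
  · simp only [hodd, ite_true]
    have hjK : (j-1)/2 < l.length / 2 := by omega
    rw [pvGetD_rev _ _ (by omega), hK]
    have e : l.length/2 - 1 - (j-1)/2 < l.length/2 := by omega
    rw [pvGetD_odds l _ e]
    congr 1
    omega
  · simp [hodd]

lemma pvGetD_int (xs : List Int) (i : Int) (hi : 0 ≤ i) :
    PySem.List.pyGetD xs i 0 = xs.getD i.toNat 0 :=
  PySem.List.pyGetD_of_nonneg xs 0 hi

-- the invariant of A's swap loop
lemma pvLoopA (l0 : List Int) :
    ∀ (m s : Nat) (acc : List Int),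
      acc.length = l0.length →
      s + m = l0.length/2/2 →
      (∀ j, j < l0.length →
        acc.getD j 0 =
          if j % 2 = 1 ∧ (j < 1+2*s ∨ 2*(l0.length/2)-1-2*s < j)
          then l0.getD (2*(l0.length/2) - j) 0 else l0.getD j 0) →
      (((List.range' s m).foldl (fun st (t : Nat) => pvSwapStep st (1+2*(t:Int)))
          (acc, 2*((l0.length/2 : Nat) : Int) - 1 - 2*(s:Int))).1.length = l0.length
       ∧ ∀ j, j < l0.length →
          (((List.range' s m).foldl (fun st (t : Nat) => pvSwapStep st (1+2*(t:Int)))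
            (acc, 2*((l0.length/2 : Nat) : Int) - 1 - 2*(s:Int))).1).getD j 0 = pvTarget l0 j) := by
  intro m
  induction m with
  | zero =>
      intro s acc hlen hs hinv
      refine ⟨by simpa using hlen, ?_⟩
      intro j hj
      have := hinv j hj
      rw [List.range'_zero, List.foldl_nil]
      rw [pvTarget]
      by_cases hodd : j % 2 = 1
      · by_cases hc : j < 1+2*s ∨ 2*(l0.length/2)-1-2*s < j
        · simp only [this, hodd, hc, true_and, ite_true]
        · -- j must be the self-paired middle odd index: j = l0.length/2 (odd K), so target = l0[j]
          simp only [this, hodd, hc, and_false, ite_false, ite_true]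
          have : 2*(l0.length/2) - j = j := by omega
          rw [this]
      · rw [this, if_neg (by simp [hodd])]
        rw [if_neg hodd]
  | succ m ih =>
      intro s acc hlen hs hinv
      set K : Nat := l0.length / 2 with hKdef
      have hsK : s < K/2 := by omega
      have hK2 : 2 ≤ K := by omega
      have hnK : 2*K ≤ l0.length := by omega
      -- concrete indices of this iteration
      have hi_lt : 1+2*s < l0.length := by omega
      have hpos_lt : 2*K-1-2*s < l0.length := by omega
      have hip : 1+2*s < 2*K-1-2*s := by omega
      rw [List.range'_succ, List.foldl_cons]
      -- evaluate one pvSwapStep into List.set form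
      have hposInt : (0:Int) ≤ 2*((K:Nat):Int) - 1 - 2*(s:Int) := by
        omega
      have hiInt : (0:Int) ≤ 1 + 2*((s:Nat):Int) := by positivity
      have hstep :
          pvSwapStep (acc, 2*((K:Nat):Int) - 1 - 2*(s:Int)) (1+2*((s:Nat):Int))
          = (((acc.set (1+2*s) (acc.getD (2*K-1-2*s) 0)).set (2*K-1-2*s) (acc.getD (1+2*s) 0)),
             2*((K:Nat):Int) - 1 - 2*((s:Nat)+1:Int)) := by
        rw [pvSwapStep]
        simp only [PySem.List.pySetD_of_nonneg _ _ hiInt,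
          PySem.List.pySetD_of_nonneg _ _ hposInt,
          pvGetD_int _ _ hiInt, pvGetD_int _ _ hposInt]
        have e1 : ((1 + 2*((s:Nat):Int))).toNat = 1+2*s := by omega
        have e2 : ((2*((K:Nat):Int) - 1 - 2*(s:Int))).toNat = 2*K-1-2*s := by omega
        rw [e1, e2, Prod.mk.injEq]
        refine ⟨rfl, by ring⟩
      rw [hstep]
      set acc' := (acc.set (1+2*s) (acc.getD (2*K-1-2*s) 0)).set (2*K-1-2*s) (acc.getD (1+2*s) 0)
        with hacc'
      have hlen' : acc'.length = l0.length := by simp [hacc', hlen]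
      have hgets : ∀ j, j < l0.length → acc'.getD j 0 =
          if j = 2*K-1-2*s then acc.getD (1+2*s) 0
          else if j = 1+2*s then acc.getD (2*K-1-2*s) 0
          else acc.getD j 0 := by
        have key : ∀ (xs : List Int) (n : Nat) (v : Int) (j : Nat), xs.length = l0.length →
            j < l0.length → n < l0.length →
            (xs.set n v).getD j 0 = if j = n then v else xs.getD j 0 := by
          intro xs n v j hxl hj hn
          rw [List.getD_eq_getElem?_getD, List.getElem?_set]
          by_cases h : j = n
          · subst h; rw [if_pos rfl, if_pos (by omega), if_pos rfl, Option.getD_some]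
          · rw [if_neg (fun hh => h hh.symm), if_neg h, List.getD_eq_getElem?_getD]
        intro j hj
        have k1 := key (acc.set (1+2*s) (acc.getD (2*K-1-2*s) 0)) (2*K-1-2*s)
          (acc.getD (1+2*s) 0) j (by simp [hlen]) hj hpos_lt
        have k2 := key acc (1+2*s) (acc.getD (2*K-1-2*s) 0) j hlen hj hi_lt
        rw [hacc', k1, k2]
      have hinv' : ∀ j, j < l0.length →
          acc'.getD j 0 =
            if j % 2 = 1 ∧ (j < 1+2*(s+1) ∨ 2*K-1-2*(s+1) < j)
            then l0.getD (2*K - j) 0 else l0.getD j 0 := by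
        intro j hj
        rw [hgets j hj]
        by_cases h1 : j = 2*K-1-2*s
        · -- receives temporal = acc[1+2s] = l0[1+2s] = l0[2K - j]
          have hmid : acc.getD (1+2*s) 0 = l0.getD (1+2*s) 0 := by
            rw [hinv _ hi_lt, if_neg]; rintro ⟨-, h | h⟩ <;> omega
          subst h1
          rw [if_pos rfl, hmid,
            if_pos (⟨by omega, Or.inr (by omega)⟩ :
              (2*K-1-2*s) % 2 = 1 ∧ ((2*K-1-2*s) < 1+2*(s+1) ∨ 2*K-1-2*(s+1) < 2*K-1-2*s))]
          congr 1
          omega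
        · by_cases h2 : j = 1+2*s
          · have hmid : acc.getD (2*K-1-2*s) 0 = l0.getD (2*K-1-2*s) 0 := by
              rw [hinv _ hpos_lt, if_neg]; rintro ⟨-, h | h⟩ <;> omega
            subst h2
            rw [if_neg h1, if_pos rfl, hmid,
              if_pos (⟨by omega, Or.inl (by omega)⟩ :
                (1+2*s) % 2 = 1 ∧ ((1+2*s) < 1+2*(s+1) ∨ 2*K-1-2*(s+1) < 1+2*s))]
            congr 1
            omega
          · rw [if_neg h1, if_neg h2, hinv j hj]
            by_cases hodd : j % 2 = 1
            · have : (j < 1+2*s ∨ 2*K-1-2*s < j) ↔ (j < 1+2*(s+1) ∨ 2*K-1-2*(s+1) < j) := by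
                omega
              simp only [hodd, true_and, this]
            · simp [hodd]
      have := ih (s+1) acc' hlen' (by omega) hinv'
      have ecast : 2*((K:Nat):Int) - 1 - 2*((s:Nat)+1:Int)
          = 2*((K:Nat):Int) - 1 - 2*(((s+1:Nat)):Int) := by push_cast; ring
      rw [ecast]
      exact this

lemma pvA_eval (l : List Int) :
    invertirlista l
      = ((List.range' 0 (l.length/2/2)).foldl (fun st (t : Nat) => pvSwapStep st (1+2*(t:Int)))
          (l, 2*((l.length/2 : Nat) : Int) - 1 - 2*((0:Nat):Int))).1 := by
  rw [invertirlista]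
  have hpos : (if PySem.Int.mod (l.length:Int) 2 = 0 then (l.length:Int) - 1 else (l.length:Int) - 2)
      = 2*((l.length/2 : Nat) : Int) - 1 - 2*((0:Nat):Int) := by
    have hm : PySem.Int.mod ((l.length:Nat):Int) 2 = ((l.length:Nat):Int) % 2 := by
      simp [PySem.Int.mod, Int.fmod_eq_emod_of_nonneg _ (by omega : (0:Int) ≤ 2)]
    simp only [hm]
    split_ifs with h <;> omega
  have hhasta : PySem.Int.floordiv (l.length:Int) 2 = ((l.length/2 : Nat) : Int) := by
    simp only [PySem.Int.floordiv]
    rw [Int.fdiv_eq_ediv]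
    have : ((2:Int)) ∣ ↑l.length ∨ (0:Int) ≤ 2 := Or.inr (by norm_num)
    simp only [Int.dvd_iff_emod_eq_zero] at this
    omega
  have hrange : PySem.List.pyRange 1 ((l.length/2 : Nat) : Int) 2
      = (List.range' 0 (l.length/2/2)).map (fun t : Nat => 1+2*(t:Int)) := by
    rw [PySem.List.pyRange_of_pos _ _ (by norm_num)]
    have hcnt : (if (1:Int) < ((l.length/2 : Nat) : Int)
        then ((((l.length/2 : Nat) : Int) - 1 + 2 - 1)/2).toNat else 0) = l.length/2/2 := by
      split_ifs with h <;> omega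
    rw [hcnt, ← List.range_eq_range']
  rw [hpos, hhasta, hrange, List.foldl_map]

lemma pvAlt_len (l : List Int) : (invertirlista_alt l).length = l.length := by
  rw [invertirlista_alt, pvLen_setOdds]

-- ===== VERDICT (by name: the statement is the Claim_ definition above) =====
theorem invertirlista_spec : Claim_equal_invertirlista := by
  unfold Claim_equal_invertirlista
  intro l _
  unfold Spec_invertirlista
  have hloop := pvLoopA l (l.length/2/2) 0 l rfl (by omega)
    (by intro j hj; rw [if_neg]; rintro ⟨h1, h2 | h3⟩ <;> omega)
  rw [pvA_eval l]
  apply List.ext_getElem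
  · rw [hloop.1, pvAlt_len]
  · intro j h1 h2
    have hj : j < l.length := by rw [pvAlt_len] at h2; exact h2
    have ha := hloop.2 j hj
    have hb := pvAlt_getD l j hj
    rw [List.getD_eq_getElem?_getD, List.getElem?_eq_getElem h1] at ha
    rw [List.getD_eq_getElem?_getD, List.getElem?_eq_getElem h2] at hb
    simp only [Option.getD_some] at ha hb
    rw [ha, hb]
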